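-- pv_equiv track=rewrite | github.com/galustian/Algorithms | problems/filtered-permutations.py | exclude_substrings_in_permutations
-- ===== SOURCE A (Python) =====
-- def exclude_substrings_in_permutations(permutations, substring_list):
--     filtered_perms = []
--     for str_perm in permutations:
--         add = True
--         for substr in substring_list:
--             if substr in str_perm:
--                 add = False
--                 break
--         if add: filtered_perms.append(str_perm)
--     return filtered_perms
-- ===== SOURCE B (Python) =====
-- def exclude_substrings_in_permutations(permutations, substring_list):
--     # Hash the patterns once; a permutation is bad iff one of its windows
--     # (of one of the distinct pattern lengths) is in the pattern set.
--     patterns = set(substring_list)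
--     lengths = set(len(s) for s in substring_list)
--
--     def clean(perm):
--         n = len(perm)
--         return not any(perm[i:i + L] in patterns
--                        for i in range(n + 1)
--                        for L in lengths
--                        if i + L <= n)
--
--     return [p for p in permutations if clean(p)]
-- ===== Notes on version B (the rewrite author's own statement) =====
-- stated objective: alternative
-- what changed: Instead of searching each pattern inside each permutation (break on first hit), B hashes the patterns into a set once and slides windows of the distinct pattern lengths over each permutation, testing each window by set membership.
import Mathlib
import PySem

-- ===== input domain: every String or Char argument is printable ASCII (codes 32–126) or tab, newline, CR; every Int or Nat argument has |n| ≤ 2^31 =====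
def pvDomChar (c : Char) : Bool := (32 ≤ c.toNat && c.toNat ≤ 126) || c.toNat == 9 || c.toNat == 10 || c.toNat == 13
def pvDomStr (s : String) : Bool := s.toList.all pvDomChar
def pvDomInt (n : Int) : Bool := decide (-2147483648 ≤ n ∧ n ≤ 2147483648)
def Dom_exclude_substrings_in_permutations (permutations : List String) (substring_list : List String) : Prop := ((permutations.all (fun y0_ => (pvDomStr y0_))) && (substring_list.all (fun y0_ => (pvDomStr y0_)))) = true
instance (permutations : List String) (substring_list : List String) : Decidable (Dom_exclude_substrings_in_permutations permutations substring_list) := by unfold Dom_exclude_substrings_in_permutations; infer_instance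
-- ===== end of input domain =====

-- B hashes the patterns into a set once and tests each window of each
-- permutation by set membership, instead of searching every pattern in every
-- permutation; same return value, alternative algorithm.
-- ===== PORT A =====
-- the inner 'for substr in substring_list: if substr in str_perm: add = False; break'
def pvA_add (str_perm : String) : List String → Bool
  | [] => true
  | substr :: rest => if PySem.Str.isIn substr str_perm then false else pvA_add str_perm rest

def exclude_substrings_in_permutations (permutations : List String) (substring_list : List String) : List String :=
  permutations.foldl (fun filtered_perms str_perm =>
    if pvA_add str_perm substring_list then filtered_perms ++ [str_perm] else filtered_perms) []

-- ===== PORT B =====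
-- 'any(perm[i:i+L] in patterns for i in range(n+1) for L in lengths if i+L<=n)';
-- perm[i:i+L] with 0 ≤ i ≤ i+L ≤ n is exactly (perm.drop i).take L.
def pvB_bad (perm : List Char) (patterns : List (List Char)) (lengths : List Nat) : Bool :=
  (List.range (perm.length + 1)).any fun i =>
    lengths.any fun L =>
      decide (i + L ≤ perm.length) && patterns.contains ((perm.drop i).take L)

def exclude_substrings_in_permutations_alt (permutations : List String) (substring_list : List String) : List String :=
  let patterns := PySem.Set.ofList (substring_list.map String.toList)
  let lengths := PySem.Set.ofList (substring_list.map fun s => s.toList.length)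
  permutations.filter fun p => !pvB_bad p.toList patterns lengths

-- ===== PRECONDITION & SPEC =====
def Spec_exclude_substrings_in_permutations (permutations : List String) (substring_list : List String) (out : List String) : Prop := out = exclude_substrings_in_permutations_alt permutations substring_list
instance (permutations : List String) (substring_list : List String) (out : List String) : Decidable (Spec_exclude_substrings_in_permutations permutations substring_list out) := by unfold Spec_exclude_substrings_in_permutations; infer_instance

-- ===== CLAIM (what is proved, stated in full; the proofs are below) =====
def Claim_equal_exclude_substrings_in_permutations : Prop := ∀ (permutations : List String) (substring_list : List String), Dom_exclude_substrings_in_permutations permutations substring_list → Spec_exclude_substrings_in_permutations permutations substring_list (exclude_substrings_in_permutations permutations substring_list)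

-- ===== LEMMAS AND PROOFS =====

-- ===== VERDICT (by name: the statement is the Claim_ definition above) =====
-- A's inner break-loop is 'no pattern occurs'
lemma pvA_add_eq_any (p : String) (subs : List String) :
    pvA_add p subs = !(subs.any fun s => PySem.Str.isIn s p) := by
  induction subs with
  | nil => rfl
  | cons s rest ih =>
    simp only [pvA_add, List.any_cons, Bool.not_or]
    split <;> simp_all

-- B's window scan fires iff some pattern is an infix of the permutation
lemma pvB_bad_eq_true_iff (perm : List Char) (subs : List String) :
    pvB_bad perm (PySem.Set.ofList (subs.map String.toList))
        (PySem.Set.ofList (subs.map fun s => s.toList.length)) = true ↔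
      ∃ s ∈ subs, s.toList <:+: perm := by
  simp only [pvB_bad, List.any_eq_true, List.mem_range, Bool.and_eq_true,
    decide_eq_true_eq, List.contains_iff_mem, PySem.Set.mem_ofList, List.mem_map]
  constructor
  · rintro ⟨i, hi, L, ⟨s, hs, rfl⟩, hle, t, ht, hteq⟩
    refine ⟨t, ht, ?_⟩
    rw [hteq]
    exact (List.take_prefix _ _).isInfix.trans (List.drop_suffix i perm).isInfix
  · rintro ⟨s, hs, hinf⟩
    obtain ⟨j, hj⟩ := (PySem.Chars.exists_prefix_drop_iff_isIn s.toList perm).mpr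
      ((PySem.Chars.isIn_iff_infix _ _).mpr hinf)
    have hpre : s.toList <+: perm.drop (min j perm.length) := by
      rcases le_total j perm.length with hle | hle
      · simpa [min_eq_left hle] using hj
      · have hnil : perm.drop j = [] := List.drop_eq_nil_of_le hle
        have hs0 : s.toList = [] := List.prefix_nil.mp (hnil ▸ hj)
        simp [hs0]
    have hlen := hpre.length_le
    simp only [List.length_drop] at hlen
    exact ⟨min j perm.length, by omega, s.toList.length, ⟨s, hs, rfl⟩, by omega,
      s, hs, List.prefix_iff_eq_take.mp hpre⟩

lemma pv_inner_agree (p : String) (subs : List String) :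
    pvA_add p subs = !pvB_bad p.toList (PySem.Set.ofList (subs.map String.toList))
        (PySem.Set.ofList (subs.map fun s => s.toList.length)) := by
  rw [pvA_add_eq_any]
  congr 1
  rw [Bool.eq_iff_iff, pvB_bad_eq_true_iff, List.any_eq_true]
  simp [PySem.Chars.isIn_iff_infix]

theorem exclude_substrings_in_permutations_spec : Claim_equal_exclude_substrings_in_permutations := by
  intro permutations substring_list _
  unfold Spec_exclude_substrings_in_permutations
  unfold exclude_substrings_in_permutations exclude_substrings_in_permutations_alt
  rw [PySem.List.foldl_append_if_eq_filter]
  simp only [List.nil_append]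
  exact (List.filter_congr fun p _ => by rw [pv_inner_agree]).symm
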